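-- pv_equiv track=rewrite | github.com/greeng00se/algorithm | BOJ/Data Structure/Stack/2504.py | solve
-- ===== SOURCE A (Python) =====
-- d = {'(': 2, ')': 2, '[': 3, ']': 3}
--
-- def solve(strings):
--     result = 0
--     coiff = 1
--     stack = []
--
--     for i in range(len(strings)):
--         letter = strings[i]
--         if letter in '[(':
--             stack.append(letter)
--             coiff *= d[letter]
--             continue
--
--         if stack and letter == ']' and stack[-1] == '[':
--             if strings[i - 1] == '[': result += coiff
--         elif stack and letter == ')' and stack[-1] == '(':
--             if strings[i - 1] == '(': result += coiff
--         else: return -1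
--         stack.pop()
--         coiff //= d[letter]
--     if stack: return -1
--     return result
-- ===== SOURCE B (Python) =====
-- def solve(strings):
--     stack = []
--     for ch in strings:
--         if ch == '(' or ch == '[':
--             stack.append(ch)
--         elif ch == ')' or ch == ']':
--             t = 0
--             while stack and isinstance(stack[-1], int):
--                 t += stack.pop()
--             opener = '(' if ch == ')' else '['
--             if not stack or stack[-1] != opener:
--                 return -1
--             stack.pop()
--             base = 2 if ch == ')' else 3
--             stack.append(base * t if t > 0 else base)
--         else:
--             return -1
--     total = 0
--     for x in stack:
--         if isinstance(x, int):
--             total += x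
--         else:
--             return -1
--     return total
-- ===== Notes on version B (the rewrite author's own statement) =====
-- stated objective: idiomatic
-- what changed: Replaces A's running coefficient (product of open-bracket factors, maintained with *= and //=) plus previous-character peeking by the classic value-on-the-stack method: numeric partial values are pushed onto the stack itself and collapsed on each closing bracket, so no coefficient, no division and no strings[i-1] lookup remain.
import Mathlib
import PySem

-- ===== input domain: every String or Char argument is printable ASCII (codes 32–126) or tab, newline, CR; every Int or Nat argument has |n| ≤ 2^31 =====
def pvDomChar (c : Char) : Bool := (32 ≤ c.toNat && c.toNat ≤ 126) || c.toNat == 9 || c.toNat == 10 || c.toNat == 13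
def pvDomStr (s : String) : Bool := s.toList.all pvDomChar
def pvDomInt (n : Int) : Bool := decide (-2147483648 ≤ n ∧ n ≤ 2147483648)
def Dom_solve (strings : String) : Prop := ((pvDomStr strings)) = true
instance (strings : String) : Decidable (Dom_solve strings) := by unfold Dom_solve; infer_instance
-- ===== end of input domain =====

-- B replaces A's index loop + running coefficient by the classic value-on-the-stack method.

-- ===== PORT A =====
-- d[letter]; in A the dict is only ever queried at one of the four bracket characters
def pyd (c : Char) : Int := if c = '(' ∨ c = ')' then 2 else 3

-- the for-loop over range(len(strings)); stack head = Python stack[-1]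
def solveLoopA (cs : List Char) (i : Nat) (stack : List Char) (coiff result : Int) : Int :=
  if h : i < cs.length then
    if cs[i] = '[' ∨ cs[i] = '(' then
      solveLoopA cs (i + 1) (cs[i] :: stack) (coiff * pyd cs[i]) result
    else if stack ≠ [] ∧ cs[i] = ']' ∧ stack.head? = some '[' then
      solveLoopA cs (i + 1) stack.tail (PySem.Int.floordiv coiff (pyd cs[i]))
        (if PySem.List.pyGet? cs ((i : Int) - 1) = some '[' then result + coiff else result)
    else if stack ≠ [] ∧ cs[i] = ')' ∧ stack.head? = some '(' then
      solveLoopA cs (i + 1) stack.tail (PySem.Int.floordiv coiff (pyd cs[i]))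
        (if PySem.List.pyGet? cs ((i : Int) - 1) = some '(' then result + coiff else result)
    else -1
  else if stack ≠ [] then -1 else result
termination_by cs.length - i

def solve (strings : String) : Int := solveLoopA strings.toList 0 [] 1 0

-- ===== PORT B =====
-- stack items: Sum.inl = an open bracket character, Sum.inr = a computed numeric value
-- the inner while-loop: pop consecutive numeric values from the top, summing them
def popInts : List (Char ⊕ Int) → Int → Int × List (Char ⊕ Int)
  | Sum.inr v :: rest, t => popInts rest (t + v)
  | st, t => (t, st)

-- the final for-loop over the stack (Python iterates bottom-to-top)
def finishLoop : List (Char ⊕ Int) → Int → Int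
  | [], total => total
  | Sum.inr v :: rest, total => finishLoop rest (total + v)
  | Sum.inl _ :: _, _ => -1

def solveLoopB (cs : List Char) (stack : List (Char ⊕ Int)) : Int :=
  match cs with
  | [] => finishLoop stack.reverse 0
  | c :: rest =>
    if c = '(' ∨ c = '[' then
      solveLoopB rest (Sum.inl c :: stack)
    else if c = ')' ∨ c = ']' then
      -- 'if not stack or stack[-1] != opener: return -1' on the stack left by the while-loop
      if (popInts stack 0).2.head? = some (Sum.inl (if c = ')' then '(' else '[')) then
        solveLoopB rest
          (Sum.inr (if 0 < (popInts stack 0).1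
              then (if c = ')' then (2:Int) else 3) * (popInts stack 0).1
              else (if c = ')' then (2:Int) else 3)) :: (popInts stack 0).2.tail)
      else -1
    else -1

def solve_alt (strings : String) : Int := solveLoopB strings.toList []

-- ===== PRECONDITION & SPEC =====
def Spec_solve (strings : String) (out : Int) : Prop := out = solve_alt strings
instance (strings : String) (out : Int) : Decidable (Spec_solve strings out) := by unfold Spec_solve; infer_instance

-- ===== CLAIM (what is proved, stated in full; the proofs are below) =====
def Claim_equal_solve : Prop := ∀ (strings : String), Dom_solve strings → Spec_solve strings (solve strings)

-- ===== LEMMAS AND PROOFS =====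

-- chars of B's stack, in order = A's stack
def charsOf (l : List (Char ⊕ Int)) : List Char :=
  l.filterMap (fun x => match x with | Sum.inl c => some c | Sum.inr _ => none)

-- product of bracket factors of the chars in the stack = A's coiff
def prodC : List (Char ⊕ Int) → Int
  | [] => 1
  | Sum.inl c :: r => pyd c * prodC r
  | Sum.inr _ :: r => prodC r

-- weighted value of B's stack = A's result
def FVal : List (Char ⊕ Int) → Int
  | [] => 0
  | Sum.inl _ :: r => FVal r
  | Sum.inr v :: r => v * prodC r + FVal r

-- relation between the previously processed character and the top of B's stack
def PrevOK (cs : List Char) (i : Nat) (st : List (Char ⊕ Int)) : Prop :=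
  (i = 0 ∧ st = []) ∨
  (1 ≤ i ∧ ∃ c, cs[i - 1]? = some c ∧
    (((c = '(' ∨ c = '[') ∧ st.head? = some (Sum.inl c)) ∨
     ((c = ')' ∨ c = ']') ∧ ∃ v : Int, st.head? = some (Sum.inr v))))

lemma popInts_nil (t : Int) : popInts [] t = (t, []) := rfl
lemma popInts_inl (c : Char) (rest : List (Char ⊕ Int)) (t : Int) :
    popInts (Sum.inl c :: rest) t = (t, Sum.inl c :: rest) := rfl
lemma popInts_inr (v : Int) (rest : List (Char ⊕ Int)) (t : Int) :
    popInts (Sum.inr v :: rest) t = popInts rest (t + v) := rfl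

lemma popInts_spec (st : List (Char ⊕ Int)) (t : Int) :
    ∃ vs : List Int, st = vs.map Sum.inr ++ (popInts st t).2 ∧
      (popInts st t).1 = t + vs.sum ∧
      (∀ x ∈ (popInts st t).2.head?, ∀ v : Int, x ≠ Sum.inr v) := by
  induction st generalizing t with
  | nil => exact ⟨[], by simp [popInts_nil]⟩
  | cons x rest ih =>
    match x with
    | Sum.inl c => exact ⟨[], by simp [popInts_inl]⟩
    | Sum.inr v =>
      obtain ⟨vs, h1, h2, h3⟩ := ih (t + v)
      refine ⟨v :: vs, ?_, ?_, ?_⟩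
      · rw [popInts_inr]; simpa using h1
      · rw [popInts_inr, h2, List.sum_cons]; ring
      · rw [popInts_inr]; exact h3

lemma charsOf_append_ints (vs : List Int) (st : List (Char ⊕ Int)) :
    charsOf (vs.map Sum.inr ++ st) = charsOf st := by
  induction vs with
  | nil => rfl
  | cons v vs ih => simpa [charsOf] using ih

lemma prodC_append_ints (vs : List Int) (st : List (Char ⊕ Int)) :
    prodC (vs.map Sum.inr ++ st) = prodC st := by
  induction vs with
  | nil => rfl
  | cons v vs ih => simpa [prodC] using ih

lemma FVal_append_ints (vs : List Int) (st : List (Char ⊕ Int)) :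
    FVal (vs.map Sum.inr ++ st) = vs.sum * prodC st + FVal st := by
  induction vs with
  | nil => simp [FVal]
  | cons v vs ih => simp [FVal, ih, prodC_append_ints]; ring

lemma pyd_pos (c : Char) : 0 < pyd c := by
  unfold pyd; split <;> norm_num

lemma floordiv_cancel (a b : Int) (ha : 0 < a) : PySem.Int.floordiv (a * b) a = b := by
  rw [PySem.Int.floordiv_eq_ediv_of_pos ha]
  exact Int.mul_ediv_cancel_left b (by omega)

lemma finishLoop_ints (vs : List Int) (acc : Int) :
    finishLoop (vs.map Sum.inr) acc = acc + vs.sum := by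
  induction vs generalizing acc with
  | nil => simp [finishLoop]
  | cons v vs ih => simp [finishLoop, ih]; ring

lemma finishLoop_has_char (l : List (Char ⊕ Int)) (acc : Int)
    (h : ∃ c, Sum.inl c ∈ l) : finishLoop l acc = -1 := by
  induction l generalizing acc with
  | nil => simp at h
  | cons x rest ih =>
    match x with
    | Sum.inl c => simp [finishLoop]
    | Sum.inr v =>
      obtain ⟨c, hc⟩ := h
      simp at hc
      exact ih _ ⟨c, hc⟩

lemma charsOf_nil_all_ints (st : List (Char ⊕ Int)) (h : charsOf st = []) :
    ∃ vs : List Int, st = vs.map Sum.inr := by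
  induction st with
  | nil => exact ⟨[], rfl⟩
  | cons x rest ih =>
    match x with
    | Sum.inl c => simp [charsOf] at h
    | Sum.inr v =>
      obtain ⟨vs, hvs⟩ := ih (by simpa [charsOf] using h)
      exact ⟨v :: vs, by simp [hvs]⟩

-- terminal step: A's post-loop check equals B's final for-loop
lemma finish_eq (st : List (Char ⊕ Int)) :
    (if charsOf st ≠ [] then (-1 : Int) else FVal st) = finishLoop st.reverse 0 := by
  by_cases h : charsOf st = []
  · obtain ⟨vs, rfl⟩ := charsOf_nil_all_ints st h
    rw [← List.map_reverse, finishLoop_ints]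
    have h2 := FVal_append_ints vs []
    simp [FVal, prodC] at h2
    simp [h, h2]
  · have hc : ∃ c, Sum.inl c ∈ st.reverse := by
      rcases List.exists_mem_of_ne_nil _ h with ⟨c, hc⟩
      simp only [charsOf, List.mem_filterMap] at hc
      obtain ⟨x, hx, hxc⟩ := hc
      match x, hxc with
      | Sum.inl c', h' =>
        simp only [Option.some.injEq] at h'
        exact ⟨c, by rw [← h']; simpa using hx⟩
    rw [finishLoop_has_char _ _ hc]
    simp [h]

-- the main simulation invariant
lemma main_sim (k : Nat) : ∀ (cs : List Char) (i : Nat) (st : List (Char ⊕ Int)),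
    cs.length - i = k →
    PrevOK cs i st →
    (∀ v : Int, Sum.inr v ∈ st → 0 < v) →
    solveLoopA cs i (charsOf st) (prodC st) (FVal st) = solveLoopB (List.drop i cs) st := by
  induction k using Nat.strong_induction_on with
  | _ k ih =>
    intro cs i st hk hprev hpos
    rw [solveLoopA]
    by_cases h : i < cs.length
    · rw [dif_pos h, List.drop_eq_getElem_cons h, solveLoopB]
      by_cases hop : cs[i] = '[' ∨ cs[i] = '('
      · rw [if_pos hop, if_pos (Or.symm hop)]
        have hrec := ih (cs.length - (i+1)) (by omega) cs (i+1) (Sum.inl cs[i] :: st) rfl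
          (Or.inr ⟨by omega, cs[i], by simp [List.getElem?_eq_getElem h],
            Or.inl ⟨Or.symm hop, rfl⟩⟩)
          (by intro v hv; exact hpos v (by simpa using hv))
        have hch : charsOf (Sum.inl cs[i] :: st) = cs[i] :: charsOf st := by simp [charsOf]
        rw [hch, (rfl : prodC (Sum.inl cs[i] :: st) = pyd cs[i] * prodC st),
          (rfl : FVal (Sum.inl cs[i] :: st) = FVal st)] at hrec
        rw [mul_comm (prodC st) (pyd cs[i])]
        exact hrec
      · have hnB : ¬(cs[i] = '(' ∨ cs[i] = '[') := by tauto
        by_cases hcl : cs[i] = ')' ∨ cs[i] = ']'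
        · -- closing bracket
          rw [if_neg hop, if_neg hnB, if_pos hcl]
          obtain ⟨vs, hsplit, ht, hhd⟩ := popInts_spec st 0
          have hvspos : ∀ v ∈ vs, (0:Int) < v := by
            intro v hv
            exact hpos v (by rw [hsplit]; exact List.mem_append_left _ (List.mem_map_of_mem hv))
          have hch : charsOf st = charsOf (popInts st 0).2 := by
            conv_lhs => rw [hsplit, charsOf_append_ints]
          have hpr : prodC st = prodC (popInts st 0).2 := by
            conv_lhs => rw [hsplit, prodC_append_ints]
          rcases hst2 : (popInts st 0).2 with _ | ⟨x, st'⟩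
          · -- stack empty after popping values: A's char stack is empty too, both -1
            have hce : charsOf st = [] := by rw [hch, hst2]; rfl
            rw [hce, if_neg (by simp), if_neg (by simp), if_neg (by simp)]
          · match x with
            | Sum.inr v =>
              exact absurd rfl (hhd (Sum.inr v) (by rw [hst2]; rfl) v)
            | Sum.inl o =>
              have hco : charsOf st = o :: charsOf st' := by rw [hch, hst2]; simp [charsOf]
              have hpo : prodC st = pyd o * prodC st' := by rw [hpr, hst2]; rfl
              simp only [List.head?_cons, List.tail_cons]
              by_cases hm : o = (if cs[i] = ')' then '(' else '[')
              · -- matching closing bracket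
                have hstne : st ≠ [] := by
                  intro hnil; rw [hnil] at hco; simp [charsOf] at hco
                have hprev' : 1 ≤ i ∧ ∃ c, cs[i-1]? = some c ∧
                    (((c = '(' ∨ c = '[') ∧ st.head? = some (Sum.inl c)) ∨
                     ((c = ')' ∨ c = ']') ∧ ∃ v : Int, st.head? = some (Sum.inr v))) := by
                  rcases hprev with ⟨_, hnil⟩ | h' <;> [exact absurd hnil hstne; exact h']
                obtain ⟨hi1, c', hc', hcase⟩ := hprev'
                have hget : PySem.List.pyGet? cs ((i:Int) - 1) = some c' := by
                  have : ((i:Int) - 1) = ((i - 1 : Nat) : Int) := by omega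
                  rw [this, PySem.List.pyGet?_natCast, hc']
                have hbase : (if cs[i] = ')' then (2:Int) else 3) = pyd o := by
                  rcases hcl with h1 | h1 <;> simp [h1] at hm ⊢ <;> simp [hm, pyd]
                have hpyd : pyd cs[i] = pyd o := by
                  rcases hcl with h1 | h1 <;> simp [h1] at hm ⊢ <;> simp [hm, pyd]
                have hdiv : PySem.Int.floordiv (prodC st) (pyd cs[i]) = prodC st' := by
                  rw [hpo, hpyd, floordiv_cancel _ _ (pyd_pos o)]
                have hBcond : ((Sum.inl o : Char ⊕ Int) : Char ⊕ Int) = Sum.inl (if cs[i] = ')' then '(' else '[') := by rw [hm]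
                rw [if_pos (congrArg some hBcond)]
                have hfv : FVal st = vs.sum * (pyd o * prodC st') + FVal st' := by
                  conv_lhs => rw [hsplit, hst2, FVal_append_ints]
                  simp [FVal, prodC]
                -- split on whether the previous char was an open (t = 0) or a close (t > 0)
                rcases hcase with ⟨hcop, hhead⟩ | ⟨hccl, v0, hhead⟩
                · -- previous char is an open bracket: it is o itself, so vs = [] and A adds coiff
                  have hvs0 : vs = [] ∧ c' = o := by
                    rcases vs with _ | ⟨w, ws⟩
                    · refine ⟨rfl, ?_⟩
                      rw [hsplit, hst2] at hhead; simp at hhead; exact hhead.symm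
                    · rw [hsplit] at hhead; simp at hhead
                  have ht0 : (popInts st 0).1 = 0 := by rw [ht, hvs0.1]; simp
                  have hX : (if 0 < (popInts st 0).1
                      then (if cs[i] = ')' then (2:Int) else 3) * (popInts st 0).1
                      else (if cs[i] = ')' then (2:Int) else 3)) = pyd o := by
                    rw [ht0]; simpa using hbase
                  rw [hX]
                  have hrec := ih (cs.length - (i+1)) (by omega) cs (i+1)
                    (Sum.inr (pyd o) :: st') rfl
                    (Or.inr ⟨by omega, cs[i], by simp [List.getElem?_eq_getElem h],
                      Or.inr ⟨hcl, pyd o, rfl⟩⟩)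
                    (by intro v hv
                        simp at hv
                        rcases hv with hv | hv
                        · rw [hv]; exact pyd_pos o
                        · exact hpos v (by rw [hsplit, hst2]
                                           exact List.mem_append_right _ (List.mem_cons_of_mem _ hv)))
                  have hchr : charsOf (Sum.inr (pyd o) :: st') = charsOf st' := by simp [charsOf]
                  rw [hchr, (rfl : prodC (Sum.inr (pyd o) :: st') = prodC st')] at hrec
                  have hfv0 : FVal st = FVal st' := by rw [hfv, hvs0.1]; simp
                  have hpgo : PySem.List.pyGet? cs ((i:Int) - 1) = some o := by
                    rw [hget, hvs0.2]
                  rcases hcl with h1 | h1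
                  · have hm' : o = '(' := by rw [h1] at hm; simpa using hm
                    rw [if_neg (by simp [h1]), if_pos (⟨by rw [hco]; simp, h1, by
                      rw [hco]; simp [hm']⟩ :
                        charsOf st ≠ [] ∧ cs[i] = ')' ∧ (charsOf st).head? = some '(')]
                    rw [hco, List.tail_cons, hdiv, hpgo]
                    rw [if_pos (show (some o : Option Char) = some '(' by rw [hm']), ← hrec]
                    congr 1
                    rw [hfv0, hpo]
                    show _ = pyd o * prodC st' + FVal st'
                    ring
                  · have hm' : o = '[' := by rw [h1] at hm; simpa using hm
                    rw [if_pos (⟨by rw [hco]; simp, h1, by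
                      rw [hco]; simp [hm']⟩ :
                        charsOf st ≠ [] ∧ cs[i] = ']' ∧ (charsOf st).head? = some '[')]
                    rw [hco, List.tail_cons, hdiv, hpgo]
                    rw [if_pos (show (some o : Option Char) = some '[' by rw [hm']), ← hrec]
                    congr 1
                    rw [hfv0, hpo]
                    show _ = pyd o * prodC st' + FVal st'
                    ring
                · -- previous char is a closing bracket: vs ≠ [], so t > 0 and A does not add
                  have hvsne : vs ≠ [] := by
                    intro hnil
                    rw [hsplit, hst2, hnil] at hhead; simp at hhead
                  have htpos : 0 < (popInts st 0).1 := by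
                    rw [ht]
                    have := List.sum_pos vs hvspos hvsne
                    omega
                  have hX : (if 0 < (popInts st 0).1
                      then (if cs[i] = ')' then (2:Int) else 3) * (popInts st 0).1
                      else (if cs[i] = ')' then (2:Int) else 3)) = pyd o * (popInts st 0).1 := by
                    rw [if_pos htpos, hbase]
                  rw [hX]
                  have hrec := ih (cs.length - (i+1)) (by omega) cs (i+1)
                    (Sum.inr (pyd o * (popInts st 0).1) :: st') rfl
                    (Or.inr ⟨by omega, cs[i], by simp [List.getElem?_eq_getElem h],
                      Or.inr ⟨hcl, _, rfl⟩⟩)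
                    (by intro v hv
                        simp at hv
                        rcases hv with hv | hv
                        · rw [hv]; exact mul_pos (pyd_pos o) htpos
                        · exact hpos v (by rw [hsplit, hst2]
                                           exact List.mem_append_right _ (List.mem_cons_of_mem _ hv)))
                  have hchr : charsOf (Sum.inr (pyd o * (popInts st 0).1) :: st') = charsOf st' := by
                    simp [charsOf]
                  rw [hchr,
                    (rfl : prodC (Sum.inr (pyd o * (popInts st 0).1) :: st') = prodC st')] at hrec
                  have hnotopen : ∀ b : Char, (b = '(' ∨ b = '[') →
                      ¬ PySem.List.pyGet? cs ((i:Int) - 1) = some b := by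
                    intro b hb hbad
                    rw [hget] at hbad
                    simp at hbad
                    rcases hccl with h1 | h1 <;> rcases hb with h2 | h2 <;>
                      rw [h1, h2] at hbad <;> exact absurd hbad (by decide)
                  have hval : FVal st = FVal (Sum.inr (pyd o * (popInts st 0).1) :: st') := by
                    rw [hfv]
                    show _ = pyd o * (popInts st 0).1 * prodC st' + FVal st'
                    rw [ht]
                    ring
                  rcases hcl with h1 | h1
                  · have hm' : o = '(' := by rw [h1] at hm; simpa using hm
                    rw [if_neg (by simp [h1]), if_pos (⟨by rw [hco]; simp, h1, by
                      rw [hco]; simp [hm']⟩ :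
                        charsOf st ≠ [] ∧ cs[i] = ')' ∧ (charsOf st).head? = some '(')]
                    rw [hco, List.tail_cons, hdiv, if_neg (hnotopen '(' (Or.inl rfl)), ← hrec]
                    congr 1
                  · have hm' : o = '[' := by rw [h1] at hm; simpa using hm
                    rw [if_pos (⟨by rw [hco]; simp, h1, by
                      rw [hco]; simp [hm']⟩ :
                        charsOf st ≠ [] ∧ cs[i] = ']' ∧ (charsOf st).head? = some '[')]
                    rw [hco, List.tail_cons, hdiv, if_neg (hnotopen '[' (Or.inr rfl)), ← hrec]
                    congr 1
              · -- mismatching close: both return -1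
                have hBne : ¬ ((some (Sum.inl o) : Option (Char ⊕ Int)) =
                    some (Sum.inl (if cs[i] = ')' then '(' else '['))) := by
                  intro hc
                  exact hm (by simpa using hc)
                rw [if_neg hBne, hco]
                rcases hcl with h1 | h1
                · have hm' : ¬ o = '(' := by rw [h1] at hm; simpa using hm
                  rw [if_neg (by simp [h1]), if_neg (by simp [hm'])]
                · have hm' : ¬ o = '[' := by rw [h1] at hm; simpa using hm
                  rw [if_neg (by simp [hm']), if_neg (by simp [h1])]
        · -- not a bracket at all: both -1
          have hA1 : ¬(charsOf st ≠ [] ∧ cs[i] = ']' ∧ (charsOf st).head? = some '[') := by tauto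
          have hA2 : ¬(charsOf st ≠ [] ∧ cs[i] = ')' ∧ (charsOf st).head? = some '(') := by tauto
          rw [if_neg hop, if_neg hA1, if_neg hA2, if_neg hnB, if_neg hcl]
    · rw [dif_neg h, List.drop_eq_nil_of_le (by omega), solveLoopB]
      exact finish_eq st

-- ===== VERDICT (by name: the statement is the Claim_ definition above) =====
theorem solve_spec : Claim_equal_solve := by
  intro s _
  unfold Spec_solve solve solve_alt
  have := main_sim s.toList.length s.toList 0 [] (by simp) (Or.inl ⟨rfl, rfl⟩) (by simp)
  simpa [charsOf, prodC, FVal] using this
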